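-- pv_equiv track=rewrite | github.com/chk7082/Algorithm | Course/SW문제해결기본 String - 2/4865_number_of_letters.py | number_of_letters
-- ===== SOURCE A (Python) =====
-- def number_of_letters(str1, str2):
--     '''
--     function that return the alphabet in str1
--     which is dominant in str2
--
--     :param
--     str1, str2 (str) : strings we're interested in
--
--     :return
--     result (str) : the alphabet in str1
--                    which is dominant in str2
--     '''
--
--     # initialize our counter dictionary with char in str1
--     dict_counter = {char : 0 for char in list(str1)}
--
--     # count it
--     for char in str2:
--         # if str1 has char
--         try:
--             dict_counter[char] += 1
--         except: # if not
--             pass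
--
--     return max(dict_counter.values())
-- ===== SOURCE B (Python) =====
-- def number_of_letters(str1, str2):
--     # No counting table at all: for each distinct letter of str1,
--     # scan str2 counting that letter; return the largest such count.
--     return max(sum(1 for ch in str2 if ch == c) for c in set(str1))
-- ===== Notes on version B (the rewrite author's own statement) =====
-- stated objective: alternative
-- what changed: A builds a zero-initialized dict over str1's letters and counts str2 into it in one pass under try/except; B uses no dictionary at all: it scans str2 once per distinct letter of str1 (nested scans) and takes the max of those per-letter counts, with empty str1 still raising ValueError from max on an empty generator.
import Mathlib
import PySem

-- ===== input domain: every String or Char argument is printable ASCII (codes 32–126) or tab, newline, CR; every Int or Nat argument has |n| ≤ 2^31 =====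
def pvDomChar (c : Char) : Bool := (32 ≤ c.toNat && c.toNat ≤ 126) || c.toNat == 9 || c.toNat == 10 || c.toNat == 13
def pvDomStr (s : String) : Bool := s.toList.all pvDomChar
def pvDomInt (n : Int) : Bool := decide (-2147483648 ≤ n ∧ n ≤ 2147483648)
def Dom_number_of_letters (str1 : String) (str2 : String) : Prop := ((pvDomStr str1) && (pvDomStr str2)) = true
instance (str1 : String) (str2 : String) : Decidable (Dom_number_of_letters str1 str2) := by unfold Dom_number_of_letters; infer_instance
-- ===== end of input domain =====

-- B drops the counting dictionary entirely: it scans str2 once per distinct letter of str1 and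
-- takes the max of those per-letter counts (objective: alternative, same-cost different algorithm).

-- ===== PORT A =====
-- dict_counter = {char : 0 for char in list(str1)}; then 'try: dict_counter[char] += 1 except: pass'
-- (the try/except is the contains-guarded increment); max(...) is PySem.List.max?, total via getD
-- (the none case is excluded by Pre_).
def number_of_letters (str1 : String) (str2 : String) : Int :=
  let dict_counter : PySem.Dict Char Int :=
    str1.toList.foldl (fun d c => d.insert c 0) PySem.Dict.empty
  let counted :=
    str2.toList.foldl
      (fun d c => if d.contains c then d.insert c (d.getD c 0 + 1) else d) dict_counter
  (PySem.List.max? counted.values (fun x => x)).getD 0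

-- ===== PORT B =====
-- max(sum(1 for ch in str2 if ch == c) for c in set(str1)); the inner sum is a fold over str2,
-- max of ints over a set is order-independent; .getD 0 is unreachable under Pre_.
def number_of_letters_alt (str1 : String) (str2 : String) : Int :=
  (PySem.List.max?
    ((PySem.Set.ofList str1.toList).map
      (fun c => str2.toList.foldl (fun acc ch => if ch == c then acc + 1 else acc) (0 : Int)))
    (fun x => x)).getD 0

-- ===== PRECONDITION & SPEC =====
-- Pre_ excludes only empty str1, where Python's max() raises ValueError in both A and B.
def Pre_number_of_letters (str1 : String) (str2 : String) : Prop := str1.toList ≠ []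
instance (str1 : String) (str2 : String) : Decidable (Pre_number_of_letters str1 str2) := by unfold Pre_number_of_letters; infer_instance
def pvWitness_number_of_letters : String × String := ("ab", "banana")

def Spec_number_of_letters (str1 : String) (str2 : String) (out : Int) : Prop := out = number_of_letters_alt str1 str2
instance (str1 : String) (str2 : String) (out : Int) : Decidable (Spec_number_of_letters str1 str2 out) := by unfold Spec_number_of_letters; infer_instance

-- ===== CLAIM (what is proved, stated in full; the proofs are below) =====
def Claim_equal_number_of_letters : Prop := ∀ (str1 : String) (str2 : String), Dom_number_of_letters str1 str2 → Pre_number_of_letters str1 str2 → Spec_number_of_letters str1 str2 (number_of_letters str1 str2)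

-- ===== LEMMAS AND PROOFS =====

-- A's counting loop never changes the key list.
lemma keys_countLoop (l : List Char) (d : PySem.Dict Char Int) :
    (l.foldl (fun d c => if d.contains c then d.insert c (d.getD c 0 + 1) else d) d).keys
      = d.keys := by
  induction l generalizing d with
  | nil => rfl
  | cons x t ih =>
      simp only [List.foldl_cons]
      by_cases h : d.contains x = true
      · rw [if_pos h, ih, PySem.Dict.keys_insert_of_contains _ _ h]
      · rw [if_neg h, ih]

-- A's counting loop adds l.count c to every key c already present.
lemma getD_countLoop (l : List Char) (d : PySem.Dict Char Int) (c : Char)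
    (hc : c ∈ d.keys) :
    (l.foldl (fun d c => if d.contains c then d.insert c (d.getD c 0 + 1) else d) d).getD c 0
      = d.getD c 0 + (l.count c : Int) := by
  induction l generalizing d with
  | nil => simp
  | cons x t ih =>
      simp only [List.foldl_cons]
      by_cases h : d.contains x = true
      · rw [if_pos h]
        rw [ih (d.insert x (d.getD x 0 + 1))
            (by rw [PySem.Dict.keys_insert_of_contains _ _ h]; exact hc)]
        rw [PySem.Dict.getD_insert]
        by_cases hxc : c = x
        · subst hxc
          simp
          ring
        · rw [if_neg hxc]
          have : (x == c) = false := by simp [Ne.symm hxc]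
          simp [List.count_cons, this]
      · rw [if_neg h]
        have hxc : x ≠ c := by
          intro hh; subst hh
          exact h ((PySem.Dict.contains_iff_mem_keys _ _).mpr hc)
        have : (x == c) = false := by simp [hxc]
        rw [ih d hc]
        simp [List.count_cons, this]

-- The initial dict {c : 0 for c in str1} maps every key to 0.
lemma getD_initLoop (l : List Char) (d : PySem.Dict Char Int)
    (h0 : ∀ c, d.getD c 0 = 0) (c : Char) :
    (l.foldl (fun d c => d.insert c (0 : Int)) d).getD c 0 = 0 := by
  induction l generalizing d with
  | nil => exact h0 c
  | cons x t ih =>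
      simp only [List.foldl_cons]
      exact ih _ (fun c' => by rw [PySem.Dict.getD_insert]; split <;> simp [h0])

-- A's final values list equals the list of per-letter counts B maximizes over.
lemma values_eq (str1 str2 : String) :
    (let dict_counter : PySem.Dict Char Int :=
        str1.toList.foldl (fun d c => d.insert c 0) PySem.Dict.empty
     let counted :=
        str2.toList.foldl
          (fun d c => if d.contains c then d.insert c (d.getD c 0 + 1) else d) dict_counter
     counted.values)
    = (PySem.Set.ofList str1.toList).map (fun c => (str2.toList.count c : Int)) := by
  simp only []
  set d0 : PySem.Dict Char Int :=
    str1.toList.foldl (fun d c => d.insert c 0) PySem.Dict.empty with hd0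
  set dc := str2.toList.foldl
      (fun d c => if d.contains c then d.insert c (d.getD c 0 + 1) else d) d0 with hdc
  have hkeys0 : d0.keys = PySem.Set.ofList str1.toList := by
    rw [hd0, PySem.Dict.keys_foldl_insert]
    simp [PySem.Set.ofList_eq_foldl, PySem.Set.update]
  have hkeys : dc.keys = PySem.Set.ofList str1.toList := by
    rw [hdc, keys_countLoop, hkeys0]
  have hnd : dc.keys.Nodup := by
    rw [hkeys]; exact PySem.Set.nodup_ofList _
  rw [PySem.Dict.values_eq_map_keys dc hnd 0, hkeys]
  apply List.map_congr_left
  intro c hcmem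
  have hc0 : c ∈ d0.keys := by rw [hkeys0]; exact hcmem
  rw [hdc, getD_countLoop _ _ _ hc0, hd0, getD_initLoop _ _ (fun c => by simp) c]
  simp

-- ===== VERDICT (by name: the statement is the Claim_ definition above) =====
theorem number_of_letters_spec : Claim_equal_number_of_letters := by
  intro str1 str2 _ _
  unfold Spec_number_of_letters number_of_letters number_of_letters_alt
  have h := values_eq str1 str2
  simp only [] at h ⊢
  rw [h]
  congr 2
  apply List.map_congr_left
  intro c _
  rw [PySem.List.foldl_beq_add_one]
  simp
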